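-- pv_equiv track=rewrite | github.com/AlunStokes/collatz | src/scaling_factors.py | inv_r
-- ===== SOURCE A (Python) =====
-- def v2(x):
--     if x == 0:
--         return 0
--     i = 1
--     while True:
--         if x % 2**i != 0:
--             return i - 1
--         i += 1
--
-- def inv_r(r, n):
--     L = []
--     i = 0
--     while i < n:
--         s = 0
--         j = 0
--         while j < i:
--             s += 3**(n-(j+1)) * 2**(L[j] - 1)
--             j += 1
--         L.append(v2(r - s) + 1)
--         i += 1
--     return tuple(L)
-- ===== SOURCE B (Python) =====
-- def _v2(x):
--     # 2-adic valuation by repeated halving (0 for x == 0, like A's v2)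
--     if x == 0:
--         return 0
--     k = 0
--     while x % 2 == 0:
--         x //= 2
--         k += 1
--     return k
--
-- def inv_r(r, n):
--     # one pass: maintain the prefix sum s and the power p = 3**(n-1-i) incrementally
--     L = []
--     s = 0
--     p = 3 ** (n - 1) if n >= 1 else 0
--     for _ in range(max(n, 0)):
--         v = _v2(r - s) + 1
--         L.append(v)
--         s += p * (1 << (v - 1))
--         p //= 3
--     return tuple(L)
-- ===== Notes on version B (the rewrite author's own statement) =====
-- stated objective: faster
-- what changed: B maintains the prefix sum s and the power 3^(n-1-i) incrementally in one pass instead of recomputing the inner sum (with fresh big-integer powers) from scratch at every step, and computes the 2-adic valuation by repeated halving instead of testing growing powers of two.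
import Mathlib
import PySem

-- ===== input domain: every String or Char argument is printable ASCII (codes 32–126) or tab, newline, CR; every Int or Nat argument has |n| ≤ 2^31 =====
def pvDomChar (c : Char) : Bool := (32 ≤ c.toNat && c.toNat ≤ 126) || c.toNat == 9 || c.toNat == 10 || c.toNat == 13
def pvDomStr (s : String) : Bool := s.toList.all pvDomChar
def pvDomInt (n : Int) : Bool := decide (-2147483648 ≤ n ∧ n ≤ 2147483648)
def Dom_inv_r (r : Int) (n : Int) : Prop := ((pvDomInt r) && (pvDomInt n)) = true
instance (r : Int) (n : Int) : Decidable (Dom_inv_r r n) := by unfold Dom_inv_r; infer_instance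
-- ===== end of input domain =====

-- B maintains the prefix sum and the power of 3 incrementally (one pass, O(n) bigint ops)
-- instead of A's quadratic recomputation of the inner sum; the return value is proved equal.


-- ===== PORT A =====
-- A's v2: increasing i, test x % 2**i.  The 'while True' loop is given fuel x.natAbs,
-- which is proved sufficient (the loop exits at i = valuation+1 ≤ x.natAbs).
def v2LoopA (x : Int) (i : Nat) (fuel : Nat) : Int :=
  match fuel with
  | 0 => 0  -- never reached for the fuel pyV2A supplies
  | fuel + 1 =>
      if PySem.Int.mod x (2 ^ i) ≠ 0 then (i : Int) - 1
      else v2LoopA x (i + 1) fuel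

def pyV2A (x : Int) : Int :=
  if x = 0 then 0 else v2LoopA x 1 x.natAbs

-- A's inner while loop over j: accumulator s, index j (exponents are provably ≥ 0 in
-- every call A makes, so .toNat is exact there).
def innerSumA (n : Int) (L : List Int) (j : Int) (s : Int) : Int :=
  match L with
  | [] => s
  | x :: rest => innerSumA n rest (j + 1) (s + 3 ^ ((n - (j + 1)).toNat) * 2 ^ ((x - 1).toNat))

-- A's outer while loop: i < n becomes fuel n.toNat, the list L is the growing state.
def loopA (r n : Int) (fuel : Nat) (L : List Int) : List Int :=
  match fuel with
  | 0 => L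
  | fuel + 1 =>
      let s := innerSumA n L 0 0
      loopA r n fuel (L ++ [pyV2A (r - s) + 1])

def inv_r (r : Int) (n : Int) : List Int := loopA r n n.toNat []

-- ===== PORT B =====
-- B's _v2: repeated halving, counter k; fuel x.natAbs is proved sufficient.
def v2LoopB (x : Int) (k : Int) (fuel : Nat) : Int :=
  match fuel with
  | 0 => k  -- never reached for the fuel pyV2B supplies
  | fuel + 1 =>
      if PySem.Int.mod x 2 = 0 then v2LoopB (PySem.Int.floordiv x 2) (k + 1) fuel
      else k

def pyV2B (x : Int) : Int :=
  if x = 0 then 0 else v2LoopB x 0 x.natAbs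

-- B's single pass: state (s, p, L); p //= 3 each step.
def loopB (r : Int) (fuel : Nat) (s p : Int) (L : List Int) : List Int :=
  match fuel with
  | 0 => L
  | fuel + 1 =>
      let v := pyV2B (r - s) + 1
      loopB r fuel (s + p * 2 ^ ((v - 1).toNat)) (PySem.Int.floordiv p 3) (L ++ [v])

def inv_r_alt (r : Int) (n : Int) : List Int :=
  loopB r n.toNat 0 (if 1 ≤ n then 3 ^ ((n - 1).toNat) else 0) []

-- ===== PRECONDITION & SPEC =====
def Spec_inv_r (r : Int) (n : Int) (out : List Int) : Prop := out = inv_r_alt r n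
instance (r : Int) (n : Int) (out : List Int) : Decidable (Spec_inv_r r n out) := by unfold Spec_inv_r; infer_instance

-- ===== CLAIM (what is proved, stated in full; the proofs are below) =====
def Claim_equal_inv_r : Prop := ∀ (r : Int) (n : Int), Dom_inv_r r n → Spec_inv_r r n (inv_r r n)

-- ===== LEMMAS AND PROOFS =====

-- characterisation of divisibility by 2^k via the valuation v
lemma dvd_pow_iff_le (x : Int) (v : Nat) (h1 : (2:Int) ^ v ∣ x) (h2 : ¬ (2:Int) ^ (v+1) ∣ x)
    (k : Nat) : ((2:Int) ^ k ∣ x ↔ k ≤ v) := by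
  constructor
  · intro hk
    by_contra hlt
    exact h2 (dvd_trans (pow_dvd_pow 2 (by omega : v + 1 ≤ k)) hk)
  · intro hle
    exact dvd_trans (pow_dvd_pow 2 hle) h1

lemma v2LoopA_eq (x : Int) (v : Nat) (h1 : (2:Int) ^ v ∣ x) (h2 : ¬ (2:Int) ^ (v+1) ∣ x) :
    ∀ (fuel i : Nat), i ≤ v + 1 → v + 2 ≤ i + fuel → v2LoopA x i fuel = (v : Int) := by
  intro fuel
  induction fuel with
  | zero => intro i h h'; omega
  | succ f ih =>
      intro i hle hfu
      rw [v2LoopA]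
      by_cases hd : PySem.Int.mod x (2 ^ i) = 0
      · have : (2:Int) ^ i ∣ x := (PySem.Int.mod_eq_zero_iff_dvd x _).mp hd
        have hi : i ≤ v := (dvd_pow_iff_le x v h1 h2 i).mp this
        simp only [hd, ne_eq, not_true_eq_false, if_false]
        exact ih (i+1) (by omega) (by omega)
      · have : ¬ (2:Int) ^ i ∣ x := fun h => hd ((PySem.Int.mod_eq_zero_iff_dvd x _).mpr h)
        have hi : ¬ i ≤ v := fun h => this ((dvd_pow_iff_le x v h1 h2 i).mpr h)
        simp only [hd, ne_eq, not_false_eq_true, if_true]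
        omega

lemma v2LoopB_eq (v : Nat) : ∀ (x : Int) (k : Int) (fuel : Nat), x ≠ 0 →
    (2:Int) ^ v ∣ x → ¬ (2:Int) ^ (v+1) ∣ x → v + 1 ≤ fuel →
    v2LoopB x k fuel = k + (v : Int) := by
  induction v with
  | zero =>
      intro x k fuel hx h1 h2 hf
      match fuel, hf with
      | f + 1, _ =>
        rw [v2LoopB]
        have hodd : ¬ (2:Int) ∣ x := by simpa using h2
        have hne : PySem.Int.mod x 2 ≠ 0 := fun h => hodd ((PySem.Int.mod_eq_zero_iff_dvd x 2).mp h)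
        rw [if_neg hne]; simp
  | succ v ih =>
      intro x k fuel hx h1 h2 hf
      match fuel, hf with
      | f + 1, hf =>
        rw [v2LoopB]
        have hdvd : (2:Int) ∣ x := dvd_trans (dvd_pow_self 2 (Nat.succ_ne_zero v)) h1
        have hm : PySem.Int.mod x 2 = 0 := (PySem.Int.mod_eq_zero_iff_dvd x 2).mpr hdvd
        simp only [hm, if_true]
        obtain ⟨y, hy⟩ := hdvd
        have hfd : PySem.Int.floordiv x 2 = y := by
          rw [PySem.Int.floordiv_eq_ediv_of_pos (by norm_num), hy]
          omega
        rw [hfd]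
        have hy0 : y ≠ 0 := by rintro rfl; simp at hy; exact hx hy
        have h1' : (2:Int) ^ v ∣ y := by
          have := h1; rw [hy, pow_succ'] at this
          exact (mul_dvd_mul_iff_left (by norm_num : (2:Int) ≠ 0)).mp this
        have h2' : ¬ (2:Int) ^ (v+1) ∣ y := by
          intro h
          apply h2
          rw [hy, pow_succ']
          exact mul_dvd_mul_left 2 h
        rw [ih y (k+1) f hy0 h1' h2' (by omega)]
        push_cast; ring

-- the two valuation routines agree
lemma pyV2_eq (x : Int) : pyV2A x = pyV2B x := by
  unfold pyV2A pyV2B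
  by_cases hx : x = 0
  · simp [hx]
  · simp only [hx, if_false]
    -- v := 2-adic valuation of |x|
    set m := x.natAbs with hm
    have hm0 : m ≠ 0 := by simpa [hm] using hx
    set v := padicValNat 2 m with hv
    have h1n : 2 ^ v ∣ m := pow_padicValNat_dvd
    have h2n : ¬ 2 ^ (v+1) ∣ m := pow_succ_padicValNat_not_dvd hm0
    have h1 : (2:Int) ^ v ∣ x := by
      have := Int.natCast_dvd_natCast.mpr h1n
      push_cast at this
      exact (Int.natAbs_dvd).mp (by simpa [hm] using this)
    have h2 : ¬ (2:Int) ^ (v+1) ∣ x := by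
      intro h
      apply h2n
      have : ((2:Int) ^ (v+1)).natAbs ∣ x.natAbs := Int.natAbs_dvd_natAbs.mpr h
      simpa [Int.natAbs_pow] using this
    have hvm : v + 1 ≤ m := by
      have hpow : 2 ^ v ≤ m := Nat.le_of_dvd (Nat.pos_of_ne_zero hm0) h1n
      have : v < 2 ^ v := Nat.lt_two_pow_self
      omega
    rw [v2LoopA_eq x v h1 h2 m 1 (by omega) (by omega),
        v2LoopB_eq v x 0 m hx h1 h2 hvm]
    ring

-- appending one element to the inner-sum list adds exactly one term
lemma innerSumA_append (n : Int) : ∀ (L : List Int) (v j s : Int),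
    innerSumA n (L ++ [v]) j s
      = innerSumA n L j s + 3 ^ ((n - (j + L.length + 1)).toNat) * 2 ^ ((v - 1).toNat) := by
  intro L
  induction L with
  | nil => intro v j s; simp [innerSumA]
  | cons x rest ih =>
      intro v j s
      simp only [List.cons_append, innerSumA, ih]
      have : (j + 1 + (rest.length : Int) + 1) = j + ((x :: rest).length : Int) + 1 := by
        simp; ring
      rw [this]

-- main loop invariant: B's running s equals A's recomputed inner sum, B's p is 3^(fuel-1)
lemma loop_eq (r n : Int) : ∀ (fuel : Nat) (L : List Int) (p : Int),
    (L.length : Int) + fuel = n → (1 ≤ fuel → p = 3 ^ (fuel - 1)) →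
    loopA r n fuel L = loopB r fuel (innerSumA n L 0 0) p L := by
  intro fuel
  induction fuel with
  | zero => intro L p h hp; rfl
  | succ f ih =>
      intro L p hlen hp
      rw [loopA, loopB]
      have hpv : p = 3 ^ f := by simpa using hp (by omega)
      have hv2 : pyV2A (r - innerSumA n L 0 0) + 1 = pyV2B (r - innerSumA n L 0 0) + 1 := by
        rw [pyV2_eq]
      set v := pyV2B (r - innerSumA n L 0 0) + 1 with hv
      rw [hv2]
      have hexp : (n - (0 + (L.length : Int) + 1)).toNat = f := by omega
      have hsum : innerSumA n (L ++ [v]) 0 0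
          = innerSumA n L 0 0 + p * 2 ^ ((v - 1).toNat) := by
        rw [innerSumA_append, hexp, hpv]
      rw [ih (L ++ [v]) (PySem.Int.floordiv p 3)
            (by simp; omega)
            (fun hf => by
              rw [hpv, PySem.Int.floordiv_eq_ediv_of_pos (by norm_num)]
              have h : f = (f - 1) + 1 := by omega
              rw [h, pow_succ, Int.mul_ediv_cancel _ (by norm_num)]
              norm_num),
          hsum]

-- ===== VERDICT (by name: the statement is the Claim_ definition above) =====
theorem inv_r_spec : Claim_equal_inv_r := by
  intro r n _
  unfold Spec_inv_r inv_r inv_r_alt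
  by_cases hn : 1 ≤ n
  · have hfe : ((([] : List Int).length : Int) + (n.toNat : Int)) = n := by simp; omega
    rw [if_pos hn,
        loop_eq r n n.toNat [] (3 ^ ((n - 1).toNat)) hfe
          (fun _ => by congr 1; omega)]
    rfl
  · have : n.toNat = 0 := by omega
    rw [this]; rfl
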